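-- pv_equiv track=rewrite | github.com/ECSIS-lab/TCHES_UH23 | Step4_Recovery_Exponent/enzan_rule.py | DJBRule2
-- ===== SOURCE A (Python) =====
-- def DJBRule2(bit_r1,w):
--     bit_r2=bit_r1
--     m_index = [i for i in range(len(bit_r2)) if bit_r2[i] == "I"]
--     for i in range(len(m_index)-1):
--         if m_index[i] + 1 == m_index[i+1]:
--             watch_bit = bit_r2[m_index[i]-3:m_index[i]]
--             if watch_bit == "xxx":
--                 watch_bit = "1xx"
--                 bit_r2 = bit_r2[:m_index[i]-3] + watch_bit + bit_r2[m_index[i]:]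
--     return bit_r2
-- ===== SOURCE B (Python) =====
-- def DJBRule2(bit_r1, w):
--     # single left-to-right scan: rewrite each disjoint "xxxII" block to "1xxII"
--     out = []
--     i = 0
--     n = len(bit_r1)
--     while i < n:
--         if bit_r1[i:i+5] == "xxxII":
--             out.append("1xxII")
--             i += 5
--         else:
--             out.append(bit_r1[i])
--             i += 1
--     return "".join(out)
-- ===== Notes on version B (the rewrite author's own statement) =====
-- stated objective: alternative
-- what changed: A first builds the list of all 'I' indices and then loops over adjacent index pairs, re-slicing and re-concatenating the whole string for each qualifying pair; B is a single left-to-right scan that copies characters and rewrites each disjoint 'xxxII' window to '1xxII' as it passes.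
import Mathlib
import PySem

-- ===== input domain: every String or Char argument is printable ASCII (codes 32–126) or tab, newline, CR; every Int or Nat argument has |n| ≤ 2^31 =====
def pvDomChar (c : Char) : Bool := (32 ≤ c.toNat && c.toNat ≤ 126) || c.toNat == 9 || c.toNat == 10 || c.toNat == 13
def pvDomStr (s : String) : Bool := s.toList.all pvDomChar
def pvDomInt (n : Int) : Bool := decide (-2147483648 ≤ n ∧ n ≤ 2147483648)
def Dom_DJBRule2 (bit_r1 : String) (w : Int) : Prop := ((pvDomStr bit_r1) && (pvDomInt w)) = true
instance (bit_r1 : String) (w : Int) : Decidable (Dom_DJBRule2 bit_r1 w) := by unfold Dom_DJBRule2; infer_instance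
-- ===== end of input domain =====

-- B replaces A's index-list construction plus per-pair full-string rebuild by one left-to-right
-- scan that rewrites each disjoint "xxxII" window to "1xxII" (alternative single-pass algorithm).

-- ===== PORT A =====
-- A-side helper: the body of A's for-loop (reads m_index[i], m_index[i+1], rewrites bit_r2)
def djbStep (m_index : List Int) (bit_r2 : String) (i : Int) : String :=
  let mi := PySem.List.pyGetD m_index i 0
  let mi1 := PySem.List.pyGetD m_index (i + 1) 0
  if mi + 1 = mi1 then
    let watch_bit := PySem.Str.slice bit_r2 (some (mi - 3)) (some mi)
    if watch_bit = "xxx" then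
      PySem.Str.slice bit_r2 none (some (mi - 3)) ++ "1xx" ++ PySem.Str.slice bit_r2 (some mi) none
    else bit_r2
  else bit_r2

def DJBRule2 (bit_r1 : String) (w : Int) : String :=
  let bit_r2 := bit_r1
  -- m_index = [i for i in range(len(bit_r2)) if bit_r2[i] == "I"]
  let m_index : List Int :=
    (PySem.List.pyRange 0 (PySem.Str.len bit_r2) 1).filter
      (fun i => PySem.Str.pyGet? bit_r2 i == some 'I')
  -- for i in range(len(m_index)-1): …
  (PySem.List.pyRange 0 (PySem.List.len m_index - 1) 1).foldl (djbStep m_index) bit_r2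

-- ===== PORT B =====
-- single scan: if the next 5 chars are "xxxII", emit "1xxII" and advance 5, else copy one char
def altGo (s : List Char) : List Char :=
  match s with
  | [] => []
  | c :: rest =>
    if (c :: rest).take 5 = ['x', 'x', 'x', 'I', 'I'] then
      '1' :: 'x' :: 'x' :: 'I' :: 'I' :: altGo (rest.drop 4)
    else
      c :: altGo rest
termination_by s.length
decreasing_by
  · simp only [List.length_cons]
    have : (rest.drop 4).length ≤ rest.length := by simp
    omega
  · simp

def DJBRule2_alt (bit_r1 : String) (w : Int) : String :=
  String.ofList (altGo bit_r1.toList)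

-- ===== PRECONDITION & SPEC =====
def Spec_DJBRule2 (bit_r1 : String) (w : Int) (out : String) : Prop := out = DJBRule2_alt bit_r1 w
instance (bit_r1 : String) (w : Int) (out : String) : Decidable (Spec_DJBRule2 bit_r1 w out) := by unfold Spec_DJBRule2; infer_instance

-- ===== CLAIM (what is proved, stated in full; the proofs are below) =====
def Claim_equal_DJBRule2 : Prop := ∀ (bit_r1 : String) (w : Int), Dom_DJBRule2 bit_r1 w → Spec_DJBRule2 bit_r1 w (DJBRule2 bit_r1 w)

-- ===== LEMMAS AND PROOFS =====

-- the Nat-side positions of 'I' in l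
def natIdx (l : List Char) : List Nat :=
  (List.range l.length).filter (fun k => l[k]? == some 'I')

-- positions j with l[j] = l[j+1] = 'I'
def adjI (l : List Char) : List Nat :=
  (natIdx l).filter (fun a => decide (a + 1 ∈ natIdx l))

-- A's loop body on (state, m_index[i], m_index[i+1]), String level
def gStr (bit_r2 : String) (mi mi1 : Int) : String :=
  if mi + 1 = mi1 then
    if PySem.Str.slice bit_r2 (some (mi - 3)) (some mi) = "xxx" then
      PySem.Str.slice bit_r2 none (some (mi - 3)) ++ "1xx" ++ PySem.Str.slice bit_r2 (some mi) none
    else bit_r2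
  else bit_r2

-- A's write step at position j, list level
def wrA (t : List Char) (j : Nat) : List Char :=
  if PySem.List.slice t (some ((j : Int) - 3)) (some (j : Int)) = ['x', 'x', 'x'] then
    PySem.List.slice t none (some ((j : Int) - 3)) ++ ['1', 'x', 'x'] ++ PySem.List.slice t (some (j : Int)) none
  else t

-- pointwise form of the scan
def pm (s : List Char) : List Char :=
  match s with
  | [] => []
  | c :: r => (if (c :: r).take 5 = ['x', 'x', 'x', 'I', 'I'] then '1' else c) :: pm r

theorem altGo_eq_pm (s : List Char) : altGo s = pm s := by
  induction s using altGo.induct with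
  | case1 => simp [altGo, pm]
  | case2 c rest h ih =>
    rcases rest with _ | ⟨a, _ | ⟨b, _ | ⟨d, _ | ⟨e, r⟩⟩⟩⟩ <;> simp_all [List.take]
    · obtain ⟨rfl, rfl, rfl, rfl, rfl⟩ := h
      simp [altGo, pm, ih]
  | case3 c rest h ih =>
    rw [show altGo (c :: rest) = c :: altGo rest from by rw [altGo]; exact if_neg h,
        show pm (c :: rest) = c :: pm rest from by rw [pm, if_neg h], ih]

theorem pm_zipIdx (s : List Char) : ∀ (u : List Char) (k : Nat), s.drop k = u →
    pm u = (u.zipIdx k).map (fun p => if (s.drop p.2).take 5 = ['x', 'x', 'x', 'I', 'I'] then '1' else p.1) := by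
  intro u
  induction u with
  | nil => intro k _; simp [pm]
  | cons c r ih =>
    intro k hk
    have h1 : s.drop (k + 1) = r := by
      rw [List.drop_add_one_eq_tail_drop, hk, List.tail_cons]
    rw [pm, List.zipIdx_cons, List.map_cons, hk, ih (k + 1) h1]

-- an index loop reading ms[i], ms[i+1] is a fold over adjacent pairs
theorem foldl_pyRange_adjacent {α : Type} (g : α → Int → Int → α) :
    ∀ (ms : List Int) (init : α),
    (PySem.List.pyRange 0 (PySem.List.len ms - 1) 1).foldl
      (fun t i => g t (PySem.List.pyGetD ms i 0) (PySem.List.pyGetD ms (i + 1) 0)) init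
    = (ms.zip ms.tail).foldl (fun t p => g t p.1 p.2) init := by
  intro ms
  induction ms with
  | nil => intro init; simp [PySem.List.pyRange_one_eq_nil]
  | cons a tl ih =>
    intro init
    rcases tl with _ | ⟨b, rest⟩
    · simp [PySem.List.pyRange_one_eq_nil]
    · have hlen : PySem.List.len (a :: b :: rest) - 1 = ((b :: rest).length : Int) := by
        simp [PySem.List.len_eq]
      rw [hlen]
      rw [PySem.List.pyRange_one_cons (by simp)]
      rw [List.foldl_cons]
      have h0 : PySem.List.pyGetD (a :: b :: rest) 0 0 = a := PySem.List.pyGetD_zero_cons a (b :: rest) 0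
      have h1 : PySem.List.pyGetD (a :: b :: rest) (0 + 1) 0 = b := by
        have e : ((0:Int) + 1) = ((1 : Nat) : Int) := by norm_num
        rw [e, PySem.List.pyGetD_natCast]
        rfl
      rw [h0, h1]
      have hshift :
          (PySem.List.pyRange (0+1) ((b :: rest).length : Int) 1).foldl
            (fun t i => g t (PySem.List.pyGetD (a :: b :: rest) i 0) (PySem.List.pyGetD (a :: b :: rest) (i + 1) 0)) (g init a b)
          = (PySem.List.pyRange 0 (PySem.List.len (b :: rest) - 1) 1).foldl
            (fun t i => g t (PySem.List.pyGetD (b :: rest) i 0) (PySem.List.pyGetD (b :: rest) (i + 1) 0)) (g init a b) := by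
        rw [PySem.List.pyRange_one, PySem.List.pyRange_one]
        rw [List.foldl_map, List.foldl_map]
        have hnn : (PySem.List.len (b :: rest) - 1 - 0).toNat = (((b :: rest).length : Int) - (0+1)).toNat := by
          simp [PySem.List.len_eq]
        rw [hnn]
        apply PySem.List.foldl_congr_mem
        intro t k _
        have e1 : ((0:Int) + 1 + (k : Int)) = ((k + 1 : Nat) : Int) := by push_cast; ring
        have e2 : ((0:Int) + 1 + (k : Int) + 1) = ((k + 2 : Nat) : Int) := by push_cast; ring
        have e3 : ((0:Int) + (k : Int)) = ((k : Nat) : Int) := by norm_num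
        have e4 : ((0:Int) + (k : Int) + 1) = ((k + 1 : Nat) : Int) := by push_cast; ring
        rw [e2, e1, e4, e3, PySem.List.pyGetD_natCast, PySem.List.pyGetD_natCast,
            PySem.List.pyGetD_natCast, PySem.List.pyGetD_natCast]
        rfl
      rw [hshift, ih]
      rfl

-- in a strictly increasing list, adjacent-pair positions are exactly the members a with a+1 also a member
theorem adj_pairs : ∀ (ns : List Nat), ns.Pairwise (· < ·) →
    (ns.zip ns.tail).filter (fun p => decide (p.1 + 1 = p.2))
    = (ns.filter (fun a => decide (a + 1 ∈ ns))).map (fun a => (a, a + 1)) := by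
  intro ns
  induction ns with
  | nil => intro _; simp
  | cons a tl ih =>
    intro hp
    rcases tl with _ | ⟨b, rest⟩
    · simp
    · have hab : a < b := (List.pairwise_cons.mp hp).1 b (by simp)
      have hrest : ∀ x ∈ rest, b < x := (List.pairwise_cons.mp (List.pairwise_cons.mp hp).2).1
      have htl : (b :: rest).Pairwise (· < ·) := (List.pairwise_cons.mp hp).2
      have hmem : (a + 1 ∈ a :: b :: rest) ↔ b = a + 1 := by
        constructor
        · intro h
          rcases List.mem_cons.mp h with h | h
          · omega
          · rcases List.mem_cons.mp h with h | h
            · omega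
            · have := hrest _ h; omega
        · intro h; subst h; simp
      have hcong : (b :: rest).filter (fun e => decide (e + 1 ∈ a :: b :: rest))
          = (b :: rest).filter (fun e => decide (e + 1 ∈ b :: rest)) := by
        apply List.filter_congr
        intro e he
        have heb : a < e := by
          rcases List.mem_cons.mp he with h | h
          · omega
          · have := hrest _ h; omega
        simp only [decide_eq_decide, List.mem_cons]
        exact ⟨fun h => h.resolve_left (by omega), Or.inr⟩
      have ih' := ih htl
      simp only [List.tail_cons] at ih'
      simp only [List.zip_cons_cons, List.tail_cons]
      rw [List.filter_cons, List.filter_cons, hcong, ih']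
      by_cases hb : a + 1 = b
      · rw [if_pos (by simpa using hb), if_pos (by simp [hb.symm])]
        simp [hb]
      · rw [if_neg (by simpa using hb), if_neg (by simp [hmem]; omega)]

theorem wrA_small {t : List Char} {j : Nat} (h : j < 3) : wrA t j = t := by
  unfold wrA
  rw [if_neg]
  intro heq
  have hl := congrArg List.length heq
  rw [PySem.List.length_slice] at hl
  have h1 : PySem.List.clampIdx t.length (j : Int) ≤ min j t.length :=
    le_of_eq (PySem.List.clampIdx_natCast ..)
  simp at hl
  omega

theorem wrA_large {t : List Char} {j : Nat} (h3 : 3 ≤ j) :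
    wrA t j = if (t.drop (j - 3)).take 3 = ['x', 'x', 'x'] then
        t.take (j - 3) ++ ['1', 'x', 'x'] ++ t.drop j
      else t := by
  unfold wrA
  have e1 : ((j : Int) - 3) = ((j - 3 : Nat) : Int) := by omega
  rw [e1, PySem.List.slice_natCast, PySem.List.slice_to_natCast, PySem.List.slice_from_natCast]
  have e2 : j - (j - 3) = 3 := by omega
  rw [e2]

-- main invariant run of A's writes
theorem runA : ∀ (js : List Nat) (t t0 : List Char),
    t.length = t0.length →
    js.Pairwise (· < ·) →
    (∀ j ∈ js, j + 1 < t0.length) →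
    (∀ j ∈ js, t.drop (j - 3) = t0.drop (j - 3)) →
    js.foldl wrA t
    = t.zipIdx.map (fun p => if (p.2 + 3 ∈ js ∧ (t0.drop p.2).take 3 = ['x', 'x', 'x']) then '1' else p.1) := by
  intro js
  induction js with
  | nil =>
    intro t t0 _ _ _ _
    simp
  | cons j js' ih =>
    intro t t0 hlen hp hbound hagree
    have hjlt : ∀ x ∈ js', j < x := (List.pairwise_cons.mp hp).1
    have htl : js'.Pairwise (· < ·) := (List.pairwise_cons.mp hp).2
    have hjn : j + 1 < t0.length := hbound j (by simp)
    have hag : t.drop (j - 3) = t0.drop (j - 3) := hagree j (by simp)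
    rw [List.foldl_cons]
    by_cases hj3 : j < 3
    · rw [wrA_small hj3, ih t t0 hlen htl (fun x hx => hbound x (by simp [hx])) (fun x hx => hagree x (by simp [hx]))]
      apply List.map_congr_left
      intro p hp'
      have hne : ¬ (p.2 + 3 = j) := by omega
      simp only [List.mem_cons, hne, false_or]
    · rw [not_lt] at hj3
      rw [wrA_large hj3, hag]
      by_cases hw : (t0.drop (j - 3)).take 3 = ['x', 'x', 'x']
      · rw [if_pos hw]
        have hjt : j ≤ t.length := by omega
        have hdd : (t.drop (j - 3)).drop 3 = t.drop j := by
          rw [List.drop_drop]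
          congr 1
          omega
        have hwt : (t.drop (j - 3)).take 3 = ['x', 'x', 'x'] := by rw [hag]; exact hw
        have ht3 : t.drop (j - 3) = 'x' :: 'x' :: 'x' :: t.drop j := by
          conv_lhs => rw [← List.take_append_drop 3 (t.drop (j - 3))]
          rw [hwt, hdd]
          rfl
        have hA : (t.take (j - 3)).length = j - 3 := by
          rw [List.length_take]
          omega
        set A := t.take (j - 3) with hAdef
        set B := t.drop j with hBdef
        have htdec : t = A ++ 'x' :: 'x' :: 'x' :: B := by
          conv_lhs => rw [← List.take_append_drop (j - 3) t]
          rw [ht3]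
        set t' := A ++ ['1', 'x', 'x'] ++ B with ht'def
        have ht'app : t' = A ++ ('1' :: 'x' :: 'x' :: B) := by simp [ht'def]
        have hlen' : t'.length = t0.length := by
          rw [ht'app]
          have := congrArg List.length htdec
          simp at this ⊢
          omega
        have hdrop_t : t.drop (j - 2) = 'x' :: 'x' :: B := by
          have h' : t.drop (j - 2) = (t.drop (j - 3)).drop 1 := by
            rw [List.drop_drop]; congr 1; omega
          rw [h', ht3]
          rfl
        have hdrop_t' : t'.drop (j - 2) = 'x' :: 'x' :: B := by
          rw [ht'app]
          have e : j - 2 = A.length + 1 := by omega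
          rw [e, ← List.drop_drop]
          rw [List.drop_append_of_le_length (by omega)]
          simp
        have hge : ∀ m, j - 2 ≤ m → t'.drop m = t.drop m := by
          intro m hm
          have e : m = (j - 2) + (m - (j - 2)) := by omega
          rw [e, ← List.drop_drop, ← List.drop_drop, hdrop_t', hdrop_t]
        have hagree' : ∀ x ∈ js', t'.drop (x - 3) = t0.drop (x - 3) := by
          intro x hx
          have hxj : j < x := hjlt x hx
          rw [hge (x - 3) (by omega), hagree x (by simp [hx])]
        rw [ih t' t0 hlen' htl (fun x hx => hbound x (by simp [hx])) hagree']
        rw [ht'app, htdec, List.zipIdx_append, List.zipIdx_append, List.map_append, List.map_append]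
        congr 1
        · apply List.map_congr_left
          intro p hp'
          have hk : p.2 < A.length := by
            have := List.snd_lt_add_of_mem_zipIdx hp'
            simpa using this
          have hne : ¬ (p.2 + 3 = j) := by omega
          simp only [List.mem_cons, hne, false_or]
        · simp only [List.zipIdx_cons, List.map_cons]
          have hc : (0 + A.length + 3 ∈ j :: js') ∧ (t0.drop (0 + A.length)).take 3 = ['x', 'x', 'x'] :=
            ⟨by simp only [List.mem_cons]; left; omega,
             by rw [show 0 + A.length = j - 3 from by omega]; exact hw⟩
          congr 1
          · rw [ite_self, if_pos hc]
          congr 1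
          · have hne : ¬ (0 + A.length + 1 + 3 = j) := by omega
            simp only [List.mem_cons, hne, false_or]
          congr 1
          · have hne : ¬ (0 + A.length + 1 + 1 + 3 = j) := by omega
            simp only [List.mem_cons, hne, false_or]
          · apply List.map_congr_left
            intro p hp'
            have hk := List.le_snd_of_mem_zipIdx hp'
            have hne : ¬ (p.2 + 3 = j) := by omega
            simp only [List.mem_cons, hne, false_or]
      · rw [if_neg hw, ih t t0 hlen htl (fun x hx => hbound x (by simp [hx])) (fun x hx => hagree x (by simp [hx]))]
        apply List.map_congr_left
        intro p hp'
        by_cases hpj : p.2 + 3 = j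
        · have c1 : ¬ (p.2 + 3 ∈ js' ∧ (t0.drop p.2).take 3 = ['x', 'x', 'x']) := by
            rintro ⟨-, hww⟩
            rw [show p.2 = j - 3 from by omega] at hww
            exact hw hww
          have c2 : ¬ (p.2 + 3 ∈ j :: js' ∧ (t0.drop p.2).take 3 = ['x', 'x', 'x']) := by
            rintro ⟨-, hww⟩
            rw [show p.2 = j - 3 from by omega] at hww
            exact hw hww
          rw [if_neg c1, if_neg c2]
        · simp only [List.mem_cons, hpj, false_or]

-- membership characterizations
theorem mem_natIdx {l : List Char} {k : Nat} : k ∈ natIdx l ↔ k < l.length ∧ l[k]? = some 'I' := by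
  simp [natIdx, List.mem_filter, List.mem_range]

theorem mem_adjI {l : List Char} {j : Nat} :
    j ∈ adjI l ↔ j + 1 < l.length ∧ l[j]? = some 'I' ∧ l[j+1]? = some 'I' := by
  simp only [adjI, List.mem_filter, mem_natIdx, decide_eq_true_eq]
  constructor
  · rintro ⟨⟨h1, h2⟩, h3, h4⟩
    exact ⟨h3, h2, h4⟩
  · rintro ⟨h1, h2, h3⟩
    exact ⟨⟨by omega, h2⟩, h1, h3⟩

theorem take3_iff {s : List Char} {a b c : Char} :
    s.take 3 = [a, b, c] ↔ s[0]? = some a ∧ s[1]? = some b ∧ s[2]? = some c := by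
  rcases s with _ | ⟨x, _ | ⟨y, _ | ⟨z, r⟩⟩⟩ <;> simp [List.take]

theorem take5_iff {s : List Char} {a b c d e : Char} :
    s.take 5 = [a, b, c, d, e] ↔ s[0]? = some a ∧ s[1]? = some b ∧ s[2]? = some c ∧ s[3]? = some d ∧ s[4]? = some e := by
  rcases s with _ | ⟨v, _ | ⟨w, _ | ⟨x, _ | ⟨y, _ | ⟨z, r⟩⟩⟩⟩⟩ <;> simp [List.take]

-- the combined write condition is exactly the 5-char window condition
theorem cond_iff {l : List Char} {k : Nat} :
    ((k + 3 ∈ adjI l) ∧ (l.drop k).take 3 = ['x', 'x', 'x'])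
    ↔ (l.drop k).take 5 = ['x', 'x', 'x', 'I', 'I'] := by
  rw [take3_iff, take5_iff, mem_adjI]
  simp only [List.getElem?_drop]
  constructor
  · rintro ⟨⟨hn, h3, h4⟩, h0, h1, h2⟩
    refine ⟨h0, h1, h2, ?_, ?_⟩
    · rw [show k + 3 = k + 3 + 0 from by omega] at h3 ⊢; exact h3
    · rw [show k + 3 + 1 = k + 4 from by omega] at h4; exact h4
  · rintro ⟨h0, h1, h2, h3, h4⟩
    have hn : k + 4 < l.length := by
      obtain ⟨hlt, -⟩ := List.getElem?_eq_some_iff.mp h4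
      omega
    refine ⟨⟨by omega, ?_, ?_⟩, h0, h1, h2⟩
    · rw [show k + 3 + 0 = k + 3 from by omega]; exact h3
    · rw [show k + 3 + 1 = k + 4 from by omega]; exact h4

-- A's fold over the string, list level, equals the scan
theorem listA_eq_pm (l : List Char) :
    (adjI l).foldl wrA l = pm l := by
  have hsort : (natIdx l).Pairwise (· < ·) := List.Pairwise.filter _ List.pairwise_lt_range
  have hsort' : (adjI l).Pairwise (· < ·) := List.Pairwise.filter _ hsort
  have hbound : ∀ j ∈ adjI l, j + 1 < l.length := by
    intro j hj
    exact (mem_adjI.mp hj).1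
  rw [runA (adjI l) l l rfl hsort' hbound (fun _ _ => rfl)]
  rw [pm_zipIdx l l 0 rfl]
  apply List.map_congr_left
  intro p hp'
  by_cases hc : (l.drop p.2).take 5 = ['x', 'x', 'x', 'I', 'I']
  · rw [if_pos (cond_iff.mpr hc), if_pos hc]
  · rw [if_neg (fun h => hc (cond_iff.mp h)), if_neg hc]

-- gStr on cast pairs is wrA guarded by adjacency
theorem gStr_toList (t : String) (mi mi1 : Int) :
    (gStr t mi mi1).toList =
      if mi + 1 = mi1 then
        (if PySem.List.slice t.toList (some (mi - 3)) (some mi) = ['x', 'x', 'x'] then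
          PySem.List.slice t.toList none (some (mi - 3)) ++ ['1', 'x', 'x'] ++ PySem.List.slice t.toList (some mi) none
        else t.toList)
      else t.toList := by
  unfold gStr
  have hcond : (PySem.Str.slice t (some (mi - 3)) (some mi) = "xxx")
      ↔ (PySem.List.slice t.toList (some (mi - 3)) (some mi) = ['x', 'x', 'x']) := by
    rw [← String.toList_inj, PySem.Str.toList_slice, PySem.Chars.slice_eq_listSlice]
    exact Iff.rfl
  by_cases h1 : mi + 1 = mi1
  · rw [if_pos h1, if_pos h1]
    by_cases h2 : PySem.Str.slice t (some (mi - 3)) (some mi) = "xxx"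
    · rw [if_pos h2, if_pos (hcond.mp h2)]
      simp only [String.toList_append, PySem.Str.toList_slice, PySem.Chars.slice_eq_listSlice]
      rfl
    · rw [if_neg h2, if_neg (fun hh => h2 (hcond.mpr hh))]
  · rw [if_neg h1, if_neg h1]

-- m_index is the cast of natIdx
theorem m_index_eq (s : String) :
    (PySem.List.pyRange 0 (PySem.Str.len s) 1).filter (fun i => PySem.Str.pyGet? s i == some 'I')
    = (natIdx s.toList).map (fun (k : Nat) => (k : Int)) := by
  rw [PySem.Str.len_eq, PySem.List.pyRange_one]
  simp only [Int.sub_zero, Int.toNat_natCast, zero_add]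
  rw [List.filter_map]
  apply congrArg
  unfold natIdx
  apply List.filter_congr
  intro k hk
  simp [Function.comp, PySem.Str.pyGet?_eq]

theorem key (bit_r1 : String) (w : Int) : DJBRule2 bit_r1 w = DJBRule2_alt bit_r1 w := by
  apply String.toList_inj.mp
  simp only [DJBRule2, DJBRule2_alt]
  rw [String.toList_ofList, altGo_eq_pm]
  rw [m_index_eq]
  set l := bit_r1.toList with hl
  set ms := (natIdx l).map (fun (k : Nat) => (k : Int)) with hms
  have hstep : (PySem.List.pyRange 0 (PySem.List.len ms - 1) 1).foldl (djbStep ms) bit_r1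
      = (PySem.List.pyRange 0 (PySem.List.len ms - 1) 1).foldl
          (fun t i => gStr t (PySem.List.pyGetD ms i 0) (PySem.List.pyGetD ms (i + 1) 0)) bit_r1 := rfl
  rw [hstep, foldl_pyRange_adjacent gStr ms bit_r1]
  rw [← List.foldl_hom String.toList (g₁ := fun (t : String) (p : Int × Int) => gStr t p.1 p.2)
      (g₂ := fun t p => if p.1 + 1 = p.2 then
        (if PySem.List.slice t (some (p.1 - 3)) (some p.1) = ['x', 'x', 'x'] then
          PySem.List.slice t none (some (p.1 - 3)) ++ ['1', 'x', 'x'] ++ PySem.List.slice t (some p.1) none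
        else t)
      else t)
      (fun t p => (gStr_toList t p.1 p.2).symm)]
  rw [hms]
  rw [show (((natIdx l).map (fun (k : Nat) => (k : Int))).tail) = ((natIdx l).tail).map (fun (k : Nat) => (k : Int)) from
    List.map_tail.symm]
  rw [List.zip_map, List.foldl_map]
  have hmain : ((natIdx l).zip (natIdx l).tail).foldl
      (fun (t : List Char) (q : Nat × Nat) => if q.1 + 1 = q.2 then wrA t q.1 else t) bit_r1.toList = pm l := by
    rw [PySem.List.foldl_ite_eq_foldl_filter (p := fun q : Nat × Nat => q.1 + 1 = q.2) (f := fun t q => wrA t q.1)]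
    rw [adj_pairs (natIdx l) (List.Pairwise.filter _ List.pairwise_lt_range)]
    rw [List.foldl_map]
    exact listA_eq_pm l
  refine Eq.trans (PySem.List.foldl_congr_mem _ _ _ _ ?_) hmain
  intro acc q hq
  simp only [Prod.map]
  exact if_congr (by omega) rfl rfl


-- ===== VERDICT (by name: the statement is the Claim_ definition above) =====
theorem DJBRule2_spec : Claim_equal_DJBRule2 := by
  intro bit_r1 w _
  unfold Spec_DJBRule2
  exact key bit_r1 w
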